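-- pv_equiv track=rewrite | github.com/nthakar1/miniBLAST | bestSeeds.py | EncodedIndexation
-- ===== SOURCE A (Python) =====
-- def EncodedIndexation(ref, k, matrix):
--     d = {}
--     for i in range(len(ref)+1-k):
--         kmer = ref[i:i+k]
--         code = KmerNumericalEncoding(kmer, matrix)
--         if code is None:
--             continue
--         if code not in d:
--             d[code] = [i]
--         else:
--             d[code].append(i)
--     return d
--
-- def KmerNumericalEncoding(kmer, matrix):
--     if matrix == None:
--         encodingDict = {"A":0, "C":1, "G":2, "T":3}
--     else:
--         encodingDict = {"A": 0, "C": 1, "D": 2, "E": 3, "F": 4, "G": 5, "H": 6, "I": 7, "K": 8, "L": 9, "M": 10, "N": 11, "P": 12, "Q": 13, "R": 14, "S": 15, "T": 16, "V": 17, "W": 18, "Y": 19}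
--
--     k = len(kmer)
--     res = 0
--     for pos in range(k):
--         char = kmer[pos]
--         # skip if not in encodingDict (ambigious nucleotides, residues)
--         if char not in encodingDict:
--             return None
--         val = encodingDict[char]
--         res += val * (4**(k-pos-1))
--     return res
-- ===== SOURCE B (Python) =====
-- def EncodedIndexation(ref, k, matrix):
--     d = {}
--     n = len(ref)
--     if k < 1 or k > n:
--         return d
--     alpha = "ACGT" if matrix is None else "ACDEFGHIKLMNPQRSTVWY"
--     enc = {c: i for i, c in enumerate(alpha)}
--     vals = [enc.get(c) for c in ref]
--     base = 4 ** (k - 1)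
--     code = 0
--     bad = 0
--     for v in vals[:k]:
--         code = code * 4 + (0 if v is None else v)
--         bad += v is None
--     if bad == 0:
--         d.setdefault(code, []).append(0)
--     for i, (v_out, v_in) in enumerate(zip(vals, vals[k:]), start=1):
--         code = (code - (0 if v_out is None else v_out) * base) * 4 + (0 if v_in is None else v_in)
--         bad += (v_in is None) - (v_out is None)
--         if bad == 0:
--             d.setdefault(code, []).append(i)
--     return d
-- ===== Notes on version B (the rewrite author's own statement) =====
-- stated objective: faster
-- what changed: B replaces A's per-window work (re-slicing the string, a dict lookup and a power computation for each of the k characters of every window) by a single translation pass plus a rolling Horner code updated in O(1) arithmetic per shift, with a running count of unencodable characters deciding which windows to record.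
-- outside the precondition, e.g. on EncodedIndexation('AC', 0, None): A returns {0: [0, 1, 2]}, B returns {}
import Mathlib
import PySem

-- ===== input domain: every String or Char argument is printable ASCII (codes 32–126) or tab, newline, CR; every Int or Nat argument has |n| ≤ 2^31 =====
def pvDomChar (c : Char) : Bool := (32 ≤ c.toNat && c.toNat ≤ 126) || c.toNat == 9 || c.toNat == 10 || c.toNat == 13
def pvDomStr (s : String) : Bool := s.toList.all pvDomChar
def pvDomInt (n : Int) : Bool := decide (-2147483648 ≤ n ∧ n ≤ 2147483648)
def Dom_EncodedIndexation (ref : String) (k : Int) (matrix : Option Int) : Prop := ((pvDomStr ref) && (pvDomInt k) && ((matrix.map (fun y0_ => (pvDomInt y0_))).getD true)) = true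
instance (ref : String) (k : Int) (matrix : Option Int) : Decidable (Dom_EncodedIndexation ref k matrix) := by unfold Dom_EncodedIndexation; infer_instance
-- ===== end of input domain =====

-- B replaces A's per-window re-encoding (dict lookups + power sum over each k-slice) by one
-- rolling Horner code updated in O(1) per shift, with a running count of unencodable chars.

-- ===== PORT A =====
def encDictA (matrix : Option Int) : PySem.Dict Char Int :=
  match matrix with
  | none => PySem.Dict.ofList [('A', 0), ('C', 1), ('G', 2), ('T', 3)]
  | some _ => PySem.Dict.ofList [('A', 0), ('C', 1), ('D', 2), ('E', 3), ('F', 4), ('G', 5),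
      ('H', 6), ('I', 7), ('K', 8), ('L', 9), ('M', 10), ('N', 11), ('P', 12), ('Q', 13),
      ('R', 14), ('S', 15), ('T', 16), ('V', 17), ('W', 18), ('Y', 19)]

-- the 'for pos in range(k)' loop of KmerNumericalEncoding: res += val * 4**(k-pos-1),
-- early 'return None' on a char missing from the dict (k-pos-1 = length of the remaining suffix)
def encLoopA (e : PySem.Dict Char Int) : List Char → Int → Option Int
  | [], res => some res
  | c :: rest, res =>
    match e.get? c with
    | none => none
    | some v => encLoopA e rest (res + v * 4 ^ rest.length)

def KmerNumericalEncodingA (kmer : List Char) (matrix : Option Int) : Option Int :=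
  encLoopA (encDictA matrix) kmer 0

def EncodedIndexation (ref : String) (k : Int) (matrix : Option Int) : List (Int × List Int) :=
  let cs := ref.toList
  let d := (PySem.List.pyRange 0 ((cs.length : Int) + 1 - k) 1).foldl
    (fun (d : PySem.Dict Int (List Int)) i =>
      let kmer := PySem.List.slice cs (some i) (some (i + k))
      match KmerNumericalEncodingA kmer matrix with
      | none => d
      | some c =>
        if d.contains c = false then d.insert c [i]
        else d.insert c (d.getD c [] ++ [i]))
    PySem.Dict.empty
  d.items

-- ===== PORT B =====
def encDictB (matrix : Option Int) : PySem.Dict Char Int :=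
  let alpha : String := match matrix with
    | none => "ACGT"
    | some _ => "ACDEFGHIKLMNPQRSTVWY"
  PySem.Dict.ofList ((PySem.List.enumerate alpha.toList 0).map (fun p => (p.2, p.1)))

-- the 'for v in vals[:k]' seeding loop: code = code*4 + v, bad += (v is None)
def seedB (st : Int × Int) (vs : List (Option Int)) : Int × Int :=
  vs.foldl (fun st v => (st.1 * 4 + v.getD 0, st.2 + (if v = none then 1 else 0))) st

-- the 'for i, (v_out, v_in) in enumerate(zip(vals, vals[k:]), start=1)' rolling loop
def rollB (base : Int) : List (Option Int) → List (Option Int) → Int → Int → Int →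
    PySem.Dict Int (List Int) → PySem.Dict Int (List Int)
  | vout :: outs, vin :: ins, i, code, bad, d =>
    let code' := (code - vout.getD 0 * base) * 4 + vin.getD 0
    let bad' := bad + (if vin = none then 1 else 0) - (if vout = none then 1 else 0)
    let d' := if bad' = 0 then d.insert code' (d.getD code' [] ++ [i]) else d
    rollB base outs ins (i + 1) code' bad' d'
  | _, _, _, _, _, d => d

def EncodedIndexation_alt (ref : String) (k : Int) (matrix : Option Int) : List (Int × List Int) :=
  let cs := ref.toList
  let n : Int := cs.length
  if k < 1 ∨ n < k then (PySem.Dict.empty : PySem.Dict Int (List Int)).items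
  else
    let enc := encDictB matrix
    let vals := cs.map (fun c => enc.get? c)
    let base : Int := 4 ^ (k - 1).toNat
    let st := seedB (0, 0) (PySem.List.slice vals none (some k))
    let d0 : PySem.Dict Int (List Int) :=
      if st.2 = 0 then PySem.Dict.empty.insert st.1 ((PySem.Dict.empty : PySem.Dict Int (List Int)).getD st.1 [] ++ [0])
      else PySem.Dict.empty
    (rollB base vals (vals.drop k.toNat) 1 st.1 st.2 d0).items

-- ===== PRECONDITION & SPEC =====
-- Pre_ excludes k ≤ 0, outside the natural k-mer domain: there A encodes every (empty) slice
-- ref[i:i+k] as 0 and returns {0: [0, …, len(ref)-k]}, while B returns {}.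
def Pre_EncodedIndexation (ref : String) (k : Int) (matrix : Option Int) : Prop := 1 ≤ k
instance (ref : String) (k : Int) (matrix : Option Int) : Decidable (Pre_EncodedIndexation ref k matrix) := by unfold Pre_EncodedIndexation; infer_instance
def pvWitness_EncodedIndexation : String × Int × Option Int := ("ACGT", 2, none)

def Spec_EncodedIndexation (ref : String) (k : Int) (matrix : Option Int) (out : List (Int × List Int)) : Prop := out = EncodedIndexation_alt ref k matrix
instance (ref : String) (k : Int) (matrix : Option Int) (out : List (Int × List Int)) : Decidable (Spec_EncodedIndexation ref k matrix out) := by unfold Spec_EncodedIndexation; infer_instance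

-- ===== CLAIM (what is proved, stated in full; the proofs are below) =====
def Claim_equal_EncodedIndexation : Prop := ∀ (ref : String) (k : Int) (matrix : Option Int), Dom_EncodedIndexation ref k matrix → Pre_EncodedIndexation ref k matrix → Spec_EncodedIndexation ref k matrix (EncodedIndexation ref k matrix)

-- ===== LEMMAS AND PROOFS =====

-- the Horner value of a window (None ↦ 0) and the shared per-window dictionary step
def hornerV (vs : List (Option Int)) (a : Int) : Int :=
  vs.foldl (fun acc v => acc * 4 + v.getD 0) a

def stepSpec (vals : List (Option Int)) (kn : Nat) (d : PySem.Dict Int (List Int)) (j : Nat) :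
    PySem.Dict Int (List Int) :=
  let w := (vals.drop j).take kn
  if w.count none = 0 then
    d.insert (hornerV w 0) (d.getD (hornerV w 0) [] ++ [(j : Int)]) else d

theorem hornerV_shift (vs : List (Option Int)) (a : Int) :
    hornerV vs a = a * 4 ^ vs.length + hornerV vs 0 := by
  induction vs generalizing a with
  | nil => simp [hornerV]
  | cons v t ih =>
    have h0 : hornerV (v :: t) a = hornerV t (a * 4 + v.getD 0) := rfl
    have h1 : hornerV (v :: t) 0 = hornerV t (0 * 4 + v.getD 0) := rfl
    rw [h0, h1, ih (a * 4 + v.getD 0), ih (0 * 4 + v.getD 0)]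
    simp [List.length_cons, pow_succ]
    ring

theorem hornerV_append_singleton (vs : List (Option Int)) (v : Option Int) (a : Int) :
    hornerV (vs ++ [v]) a = hornerV vs a * 4 + v.getD 0 := by
  simp [hornerV, List.foldl_append]

theorem encLoopA_char (e : PySem.Dict Char Int) (kmer : List Char) (res : Int) :
    encLoopA e kmer res =
      if (kmer.map e.get?).count none = 0 then some (res + hornerV (kmer.map e.get?) 0)
      else none := by
  induction kmer generalizing res with
  | nil => simp [encLoopA, hornerV]
  | cons c t ih =>
    show (match e.get? c with
      | none => none
      | some v => encLoopA e t (res + v * 4 ^ t.length)) = _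
    cases h : e.get? c with
    | none => simp [h, List.count_cons]
    | some v =>
      show encLoopA e t (res + v * 4 ^ t.length) = _
      rw [ih]
      have hh : hornerV (some v :: t.map e.get?) 0 = v * 4 ^ t.length + hornerV (t.map e.get?) 0 := by
        have h0 : hornerV (some v :: t.map e.get?) 0
            = hornerV (t.map e.get?) (0 * 4 + (some v : Option Int).getD 0) := rfl
        rw [h0, hornerV_shift]
        simp
      simp [h]
      split_ifs with hc
      · rw [hh]
        exact congrArg some (by ring)
      · rfl

theorem encDictB_eq (matrix : Option Int) : encDictB matrix = encDictA matrix := by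
  cases matrix with
  | none => decide
  | some v =>
    have h1 : encDictB (some v) = encDictB (some 0) := rfl
    have h2 : encDictA (some v) = encDictA (some 0) := rfl
    rw [h1, h2]; decide

theorem getD_of_contains_false (d : PySem.Dict Int (List Int)) (c : Int)
    (h : d.contains c = false) : d.getD c [] = [] := by
  simp only [PySem.Dict.getD, PySem.Dict.contains, PySem.Dict.get?] at *
  simp only [List.any_eq_false] at h
  rw [List.find?_eq_none.mpr (by simpa using h)]
  rfl

theorem seedB_char (vs : List (Option Int)) (a b : Int) :
    seedB (a, b) vs = (hornerV vs a, b + (vs.count none : Int)) := by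
  induction vs generalizing a b with
  | nil => simp [seedB, hornerV]
  | cons v t ih =>
    have h0 : seedB (a, b) (v :: t) = seedB (a * 4 + v.getD 0, b + (if v = none then 1 else 0)) t := rfl
    have h1 : hornerV (v :: t) a = hornerV t (a * 4 + v.getD 0) := rfl
    rw [h0, ih, h1, List.count_cons]
    cases v <;> simp <;> ring

theorem rollB_nil (base : Int) (outs : List (Option Int)) (i code bad : Int)
    (d : PySem.Dict Int (List Int)) : rollB base outs [] i code bad d = d := by
  cases outs <;> rfl

theorem rollB_eq (vals : List (Option Int)) (kn : Nat) (hk : kn ≠ 0) :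
    ∀ (m j : Nat) (d : PySem.Dict Int (List Int)), j + kn + m = vals.length →
    rollB (4 ^ (kn - 1)) (vals.drop j) (vals.drop (j + kn)) ((j : Int) + 1)
        (hornerV ((vals.drop j).take kn) 0) (((vals.drop j).take kn).count none) d
      = (List.range' (j + 1) m).foldl (stepSpec vals kn) d := by
  obtain ⟨kn', rfl⟩ : ∃ kn', kn = kn' + 1 := ⟨kn - 1, by omega⟩
  intro m
  induction m with
  | zero =>
    intro j d hlen
    have hnil : vals.drop (j + (kn' + 1)) = [] := by
      apply List.drop_eq_nil_of_le; omega
    rw [hnil, rollB_nil]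
    rfl
  | succ m ih =>
    intro j d hlen
    have hj : j < vals.length := by omega
    have hjk : j + (kn' + 1) < vals.length := by omega
    have hdropj : vals.drop j = vals[j] :: vals.drop (j + 1) := List.drop_eq_getElem_cons hj
    have hdropjk : vals.drop (j + (kn' + 1)) = vals[j + (kn' + 1)] :: vals.drop (j + (kn' + 1) + 1) :=
      List.drop_eq_getElem_cons hjk
    have hlenT : ((vals.drop (j + 1)).take kn').length = kn' := by
      simp [List.length_take, List.length_drop]; omega
    have hWj1 : (vals.drop (j + 1)).take (kn' + 1)
        = (vals.drop (j + 1)).take kn' ++ [vals[j + (kn' + 1)]] := by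
      rw [List.take_succ]
      congr 1
      have hlt : kn' < (vals.drop (j + 1)).length := by simp; omega
      rw [List.getElem?_eq_getElem hlt]
      have hg : (vals.drop (j + 1))[kn']'hlt = vals[j + (kn' + 1)] := by
        rw [List.getElem_drop]
        congr 1
        omega
      rw [hg]
      rfl
    have hcode : (hornerV (vals[j] :: (vals.drop (j + 1)).take kn') 0
            - (vals[j]).getD 0 * 4 ^ kn') * 4 + (vals[j + (kn' + 1)]).getD 0
        = hornerV ((vals.drop (j + 1)).take (kn' + 1)) 0 := by
      rw [hWj1, hornerV_append_singleton]
      have h0 : hornerV (vals[j] :: ((vals.drop (j + 1)).take kn')) 0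
          = hornerV ((vals.drop (j + 1)).take kn') (0 * 4 + (vals[j]).getD 0) := rfl
      rw [h0, hornerV_shift, hlenT]
      ring
    have hbad : (((vals[j] :: (vals.drop (j + 1)).take kn').count none : Int)
            + (if vals[j + (kn' + 1)] = none then 1 else 0))
            - (if vals[j] = none then 1 else 0)
        = (((vals.drop (j + 1)).take (kn' + 1)).count none : Int) := by
      rw [hWj1]
      rcases h1 : vals[j] with _ | x <;> rcases h2 : vals[j + (kn' + 1)] with _ | y <;>
        simp [List.count_cons, List.count_append]
    have hd' : (if (((vals.drop (j + 1)).take (kn' + 1)).count none : Int) = 0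
          then d.insert (hornerV ((vals.drop (j + 1)).take (kn' + 1)) 0)
            (d.getD (hornerV ((vals.drop (j + 1)).take (kn' + 1)) 0) [] ++ [(j : Int) + 1])
          else d)
        = stepSpec vals (kn' + 1) d (j + 1) := by
      unfold stepSpec
      simp only [Nat.cast_eq_zero]
      rw [show ((j : Int) + 1) = (((j + 1 : Nat) : Int)) by push_cast; ring]
    conv_lhs => rw [hdropj, hdropjk, rollB]
    simp only [List.take_succ_cons, Nat.add_sub_cancel]
    rw [hcode, hbad, hd']
    have hidx : j + (kn' + 1) + 1 = (j + 1) + (kn' + 1) := by omega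
    have hidx2 : (j : Int) + 1 + 1 = ((j + 1 : Nat) : Int) + 1 := by push_cast; ring
    simp only [Nat.add_sub_cancel] at ih
    rw [hidx, hidx2, ih (j + 1) _ (by omega)]
    rw [List.range'_succ]
    rfl

theorem stepA_eq_stepSpec (cs : List Char) (k : Int) (matrix : Option Int)
    (kn : Nat) (hkn : kn = k.toNat) (hk : 1 ≤ k)
    (j : Nat) (hj : j + kn ≤ cs.length) (d : PySem.Dict Int (List Int)) :
    (match KmerNumericalEncodingA (PySem.List.slice cs (some (j : Int)) (some ((j : Int) + k))) matrix with
      | none => d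
      | some c =>
        if d.contains c = false then d.insert c [(j : Int)]
        else d.insert c (d.getD c [] ++ [(j : Int)]))
    = stepSpec (cs.map (fun c => (encDictA matrix).get? c)) kn d j := by
  have hksplit : ((j : Int) + k) = (((j + kn : Nat)) : Int) := by push_cast; omega
  rw [hksplit, PySem.List.slice_natCast]
  have htake : j + kn - j = kn := by omega
  rw [htake]
  unfold KmerNumericalEncodingA
  rw [encLoopA_char]
  have hmap : ((cs.drop j).take kn).map (fun c => (encDictA matrix).get? c)
      = (((cs.map (fun c => (encDictA matrix).get? c)).drop j).take kn) := by
    simp [List.map_take, List.map_drop]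
  rw [hmap]
  simp only [stepSpec, zero_add]
  split_ifs with h0
  · cases hcv : PySem.Dict.contains d
        (hornerV (((cs.map (fun c => (encDictA matrix).get? c)).drop j).take kn) 0) with
    | false => simp [hcv, getD_of_contains_false d _ hcv]
    | true => simp [hcv]
  · rfl

theorem A_eq (ref : String) (k : Int) (matrix : Option Int) (hk : 1 ≤ k)
    (hkn : k.toNat ≤ ref.toList.length) :
    EncodedIndexation ref k matrix =
      ((List.range (ref.toList.length - k.toNat + 1)).foldl
        (stepSpec (ref.toList.map (fun c => (encDictA matrix).get? c)) k.toNat)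
        PySem.Dict.empty).items := by
  unfold EncodedIndexation
  dsimp only
  have hb : ((ref.toList.length : Int) + 1 - k)
      = (((ref.toList.length - k.toNat + 1 : Nat)) : Int) := by push_cast; omega
  rw [hb, PySem.List.pyRange_one]
  have hcnt : ((((ref.toList.length - k.toNat + 1 : Nat)) : Int) - 0).toNat
      = ref.toList.length - k.toNat + 1 := by omega
  rw [hcnt, List.foldl_map]
  congr 1
  apply PySem.List.foldl_congr_mem
  intro d j hjmem
  have hj : j + k.toNat ≤ ref.toList.length := by
    have := List.mem_range.mp hjmem
    omega
  have hz : ((0 : Int) + (j : Int)) = (j : Int) := by ring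
  rw [hz]
  exact stepA_eq_stepSpec ref.toList k matrix k.toNat rfl hk j hj d

theorem B_eq (ref : String) (k : Int) (matrix : Option Int) (hk : 1 ≤ k)
    (hkn : k.toNat ≤ ref.toList.length) :
    EncodedIndexation_alt ref k matrix =
      ((List.range (ref.toList.length - k.toNat + 1)).foldl
        (stepSpec (ref.toList.map (fun c => (encDictA matrix).get? c)) k.toNat)
        PySem.Dict.empty).items := by
  have hguard : ¬(k < 1 ∨ (ref.toList.length : Int) < k) := by omega
  unfold EncodedIndexation_alt
  rw [encDictB_eq]
  dsimp only
  rw [if_neg hguard]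
  set vals := ref.toList.map (fun c => (encDictA matrix).get? c) with hvals
  have hlenv : vals.length = ref.toList.length := by simp [hvals]
  set kn := k.toNat with hknn
  have hk0 : kn ≠ 0 := by omega
  rw [PySem.List.slice_to vals (by omega : (0 : Int) ≤ k), seedB_char]
  have hbase : (k - 1).toNat = kn - 1 := by omega
  have hd0 : (if (0 : Int) + ((vals.take kn).count none : Int) = 0
        then (PySem.Dict.empty : PySem.Dict Int (List Int)).insert (hornerV (vals.take kn) 0)
          ((PySem.Dict.empty : PySem.Dict Int (List Int)).getD (hornerV (vals.take kn) 0) [] ++ [0])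
        else PySem.Dict.empty)
      = stepSpec vals kn PySem.Dict.empty 0 := by
    simp only [stepSpec, List.drop_zero, zero_add, Nat.cast_eq_zero, Nat.cast_zero]
  rw [hbase, hd0]
  have hro := rollB_eq vals kn hk0 (vals.length - kn) 0 (stepSpec vals kn PySem.Dict.empty 0)
    (by omega)
  simp only [Nat.zero_add, List.drop_zero, Nat.cast_zero, zero_add] at hro
  dsimp only
  simp only [← hknn, zero_add]
  rw [hro]
  congr 1
  rw [hlenv, List.range_eq_range']
  rw [show ref.toList.length - kn + 1 = (ref.toList.length - kn) + 1 from rfl]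
  rw [List.range'_succ]
  rfl

-- ===== VERDICT (by name: the statement is the Claim_ definition above) =====
theorem EncodedIndexation_spec : Claim_equal_EncodedIndexation := by
  intro ref k matrix _ hp
  unfold Spec_EncodedIndexation
  by_cases hkn : k.toNat ≤ ref.toList.length
  · rw [A_eq ref k matrix hp hkn, B_eq ref k matrix hp hkn]
  · -- k exceeds the length: A's range is empty, B's guard fires; both dicts are empty
    unfold EncodedIndexation EncodedIndexation_alt
    dsimp only
    rw [PySem.List.pyRange_one_eq_nil (by omega : (ref.toList.length : Int) + 1 - k ≤ 0)]
    rw [if_pos (by omega : k < 1 ∨ (ref.toList.length : Int) < k)]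
    rfl
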